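-- pv_equiv track=rewrite | github.com/yuiyeong/coding_test | problem_10.py | f
-- ===== SOURCE A (Python) =====
-- def f(num):
--     total = num
--     last_divisor = 1
--     divisor = 2
--
--     while divisor <= num:
--         total += (divisor - last_divisor) * (num // divisor)
--         last_divisor = divisor
--         divisor *= 2
--
--     return total
-- ===== SOURCE B (Python) =====
-- def f(num):
--     if num < 1:
--         return num
--     return (num + 1) // 2 + 2 * f(num // 2)
-- ===== Notes on version B (the rewrite author's own statement) =====
-- stated objective: simpler
-- what changed: Replaced the doubling-divisor telescoping while-loop with a three-line divide-and-conquer recursion on the halved argument, using the recurrence S(n) = ceil(n/2) + twice S of the half.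
import Mathlib
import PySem

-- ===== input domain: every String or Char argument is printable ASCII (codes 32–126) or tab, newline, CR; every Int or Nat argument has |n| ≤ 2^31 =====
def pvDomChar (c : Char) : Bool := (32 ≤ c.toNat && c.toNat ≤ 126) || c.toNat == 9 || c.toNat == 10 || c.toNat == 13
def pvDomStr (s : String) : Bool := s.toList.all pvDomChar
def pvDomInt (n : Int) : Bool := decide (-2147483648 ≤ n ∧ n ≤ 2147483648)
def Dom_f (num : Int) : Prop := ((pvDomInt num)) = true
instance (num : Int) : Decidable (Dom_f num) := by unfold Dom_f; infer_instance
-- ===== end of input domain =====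

-- B replaces A's doubling-divisor telescoping while-loop by a three-line recursion on the halved argument (simpler; same return value).

-- ===== PORT A =====
-- the while loop; the positivity proof argument only justifies termination (divisor is 2,4,8,… in every call)
def fLoop (num total last_divisor divisor : Int) (hd : 0 < divisor) : Int :=
  if h : divisor ≤ num then
    fLoop num (total + (divisor - last_divisor) * (PySem.Int.floordiv num divisor)) divisor (divisor * 2) (by omega)
  else
    total
termination_by (num + 1 - divisor).toNat
decreasing_by simp_wf; omega

def f (num : Int) : Int := fLoop num num 1 2 (by norm_num)

-- ===== PORT B =====
def f_alt (num : Int) : Int :=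
  if h : num < 1 then num
  else PySem.Int.floordiv (num + 1) 2 + 2 * f_alt (PySem.Int.floordiv num 2)
termination_by num.toNat
decreasing_by
  simp only [PySem.Int.floordiv_eq_ediv_of_pos (by norm_num : (0:Int) < 2)]
  omega

-- ===== PRECONDITION & SPEC =====
def Spec_f (num : Int) (out : Int) : Prop := out = f_alt num
instance (num : Int) (out : Int) : Decidable (Spec_f num out) := by unfold Spec_f; infer_instance

-- ===== CLAIM (what is proved, stated in full; the proofs are below) =====
def Claim_equal_f : Prop := ∀ (num : Int), Dom_f num → Spec_f num (f num)

-- ===== LEMMAS AND PROOFS =====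

-- floor-division composes: (n // 2) // d = n // (2*d) for 0 < d
theorem floordiv_floordiv (n d : Int) (hd : 0 < d) :
    PySem.Int.floordiv (PySem.Int.floordiv n 2) d = PySem.Int.floordiv n (2 * d) := by
  rw [PySem.Int.floordiv_eq_ediv_of_pos hd,
      PySem.Int.floordiv_eq_ediv_of_pos (by norm_num : (0:Int) < 2),
      PySem.Int.floordiv_eq_ediv_of_pos (by positivity)]
  exact Int.ediv_ediv_of_nonneg (by norm_num)

-- halving relation between A's loop on num and on num // 2
theorem fLoop_halve (n : Int) : ∀ (k : Nat) (d t c l total last d2 : Int)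
    (hd : 0 < d) (hd2 : 0 < d2),
    total = 2 * t + c → last = 2 * l → d2 = 2 * d → (n + 1 - d2).toNat ≤ k →
    fLoop n total last d2 hd2 = 2 * fLoop (PySem.Int.floordiv n 2) t l d hd + c := by
  intro k
  induction k with
  | zero =>
      intro d t c l total last d2 hd hd2 ht hl h2d hk
      subst ht hl h2d
      conv_lhs => rw [fLoop.eq_def]
      conv_rhs => rw [fLoop.eq_def]
      have hA : ¬ (2 * d ≤ n) := by omega
      have hB : ¬ (d ≤ PySem.Int.floordiv n 2) := by
        rw [PySem.Int.floordiv_eq_ediv_of_pos (by norm_num : (0:Int) < 2)]; omega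
      simp only [dif_neg hA, dif_neg hB]
  | succ k ih =>
      intro d t c l total last d2 hd hd2 ht hl h2d hk
      subst ht hl h2d
      conv_lhs => rw [fLoop.eq_def]
      conv_rhs => rw [fLoop.eq_def]
      have hiff : (2 * d ≤ n) ↔ (d ≤ PySem.Int.floordiv n 2) := by
        rw [PySem.Int.floordiv_eq_ediv_of_pos (by norm_num : (0:Int) < 2)]; omega
      by_cases hc : 2 * d ≤ n
      · simp only [dif_pos hc, dif_pos (hiff.mp hc)]
        refine ih (d * 2) (t + (d - l) * PySem.Int.floordiv (PySem.Int.floordiv n 2) d)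
          c d _ _ _ (by omega) (by omega) ?_ (by ring) (by ring) (by omega)
        rw [floordiv_floordiv n d hd]
        ring
      · simp only [dif_neg hc, dif_neg (fun hh => hc (hiff.mpr hh))]

-- A satisfies B's recurrence
theorem f_rec (n : Int) (hn : 1 ≤ n) :
    f n = (n - PySem.Int.floordiv n 2) + 2 * f (PySem.Int.floordiv n 2) := by
  unfold f
  conv_lhs => rw [fLoop.eq_def]
  by_cases h : (2:Int) ≤ n
  · simp only [dif_pos h]
    have hw := fLoop_halve n (n + 1 - 4).toNat 2 (PySem.Int.floordiv n 2)
      (n - PySem.Int.floordiv n 2) 1 (n + (2 - 1) * PySem.Int.floordiv n 2) 2 (2 * 2)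
      f._proof_1 (by norm_num) (by ring) (by norm_num) (by norm_num) (by omega)
    rw [hw]
    ring
  · have hn1 : n = 1 := by omega
    subst hn1
    simp only [dif_neg h]
    conv_rhs => rw [fLoop.eq_def]
    norm_num

theorem f_eq_f_alt (n : Int) : f n = f_alt n := by
  by_cases hpos : n < 1
  · rw [f_alt.eq_def]
    simp only [dif_pos hpos]
    unfold f
    rw [fLoop.eq_def]
    have hno : ¬ ((2:Int) ≤ n) := by omega
    rw [dif_neg hno]
  · have hn : 1 ≤ n := by omega
    rw [f_rec n hn, f_eq_f_alt (PySem.Int.floordiv n 2)]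
    conv_rhs => rw [f_alt.eq_def]
    simp only [dif_neg hpos]
    have heq : PySem.Int.floordiv (n + 1) 2 = n - PySem.Int.floordiv n 2 := by
      rw [PySem.Int.floordiv_eq_ediv_of_pos (by norm_num : (0:Int) < 2),
          PySem.Int.floordiv_eq_ediv_of_pos (by norm_num : (0:Int) < 2)]
      omega
    rw [heq]
termination_by n.toNat
decreasing_by
  rw [PySem.Int.floordiv_eq_ediv_of_pos (by norm_num : (0:Int) < 2)]
  omega

-- ===== VERDICT (by name: the statement is the Claim_ definition above) =====
theorem f_spec : Claim_equal_f := by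
  intro num _
  unfold Spec_f
  exact f_eq_f_alt num
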